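-- pv_equiv track=rewrite | github.com/uvsmile9/huawei_od | HJ20-密码验证.py | check_p
-- ===== SOURCE A (Python) =====
-- def check_p(s:str):
--     if len(s)<=8:
--         return False
--     a,b,c,d=0,0,0,0
--     for i in s:
--         if ord('a')<=ord(i)<=ord('z'):
--             a=1
--         elif ord('A')<=ord(i)<=ord('Z'):
--             b=1
--         elif ord('0')<=ord(i)<=ord('9'):
--             c=1
--         else:
--             d=1
--     if a+b+c+d<3:
--         return False
--     for i in range(len(s)-3):
--         if len(s.split(s[i:i+3]))>=3:
--             return False
--     return True
-- ===== SOURCE B (Python) =====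
-- def check_p(s: str):
--     if len(s) <= 8:
--         return False
--     kinds = (any('a' <= c <= 'z' for c in s)
--              + any('A' <= c <= 'Z' for c in s)
--              + any('0' <= c <= '9' for c in s)
--              + any(not ('a' <= c <= 'z' or 'A' <= c <= 'Z' or '0' <= c <= '9') for c in s))
--     if kinds < 3:
--         return False
--     first = {}
--     for i in range(len(s) - 2):
--         g = s[i:i + 3]
--         if g in first:
--             if i - first[g] >= 3:
--                 return False
--         else:
--             first[g] = i
--     return True
-- ===== Notes on version B (the rewrite author's own statement) =====
-- stated objective: alternative
-- what changed: replaced the per-index s.split scan for repeated 3-grams by a single pass with a dict of each 3-gram's first position (flag iff i - first >= 3), and the four 0/1 flag accumulators by four any() scans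
import Mathlib
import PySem

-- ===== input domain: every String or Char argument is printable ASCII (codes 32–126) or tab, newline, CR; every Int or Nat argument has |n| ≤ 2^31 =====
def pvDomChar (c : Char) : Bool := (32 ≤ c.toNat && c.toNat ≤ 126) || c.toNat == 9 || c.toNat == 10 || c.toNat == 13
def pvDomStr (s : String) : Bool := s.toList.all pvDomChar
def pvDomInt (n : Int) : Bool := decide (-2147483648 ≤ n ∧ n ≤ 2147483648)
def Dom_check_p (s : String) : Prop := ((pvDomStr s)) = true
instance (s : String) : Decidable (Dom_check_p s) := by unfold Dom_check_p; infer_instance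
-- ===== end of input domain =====

-- B replaces A's per-index s.split repeat scan by one pass with a dict of each 3-gram's first
-- position, and A's four 0/1 flag accumulators by four any() scans (objective: alternative).

-- ===== PORT A =====
-- step of A's flag loop: the four if/elif branches, in order, over state (a,b,c,d)
def pvAStep (st : Int × Int × Int × Int) (ch : Char) : Int × Int × Int × Int :=
  let (a, b, c, d) := st
  if 97 ≤ ch.toNat && ch.toNat ≤ 122 then (1, b, c, d)
  else if 65 ≤ ch.toNat && ch.toNat ≤ 90 then (a, 1, c, d)
  else if 48 ≤ ch.toNat && ch.toNat ≤ 57 then (a, b, 1, d)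
  else (a, b, c, 1)

-- 'if len(s)<=8: return False'; flag loop; 'for i in range(len(s)-3): if len(s.split(s[i:i+3]))>=3: return False'
-- (s.split(sep) with the always-nonempty sep s[i:i+3] is exactly Chars.splitOn; .any is the early-exit loop)
def check_p (s : String) : Bool :=
  let cs := s.toList
  if (cs.length : Int) ≤ 8 then false
  else
    let (a, b, c, d) := cs.foldl pvAStep (0, 0, 0, 0)
    if a + b + c + d < 3 then false
    else
      if (PySem.List.pyRange 0 ((cs.length : Int) - 3) 1).any (fun i =>
           3 ≤ (PySem.Chars.splitOn cs (PySem.List.slice cs (some i) (some (i + 3)))).length)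
      then false else true

-- ===== PORT B =====
-- B's dict loop: 'for i in range(len(s)-2): g = s[i:i+3]; if g in first: (return False if i-first[g]>=3) else: first[g]=i'
def pvBLoop (cs : List Char) (first : PySem.Dict (List Char) Nat) (i : Nat) : Bool :=
  if i < cs.length - 2 then
    let g := (cs.drop i).take 3
    match first.get? g with
    | some j => if 3 ≤ i - j then false else pvBLoop cs first (i + 1)
    | none => pvBLoop cs (first.insert g i) (i + 1)
  else true
termination_by cs.length - 2 - i

def check_p_alt (s : String) : Bool :=
  let cs := s.toList
  if (cs.length : Int) ≤ 8 then false
  else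
    let kinds : Int :=
      (if cs.any (fun c => 97 ≤ c.toNat && c.toNat ≤ 122) then 1 else 0)
      + (if cs.any (fun c => 65 ≤ c.toNat && c.toNat ≤ 90) then 1 else 0)
      + (if cs.any (fun c => 48 ≤ c.toNat && c.toNat ≤ 57) then 1 else 0)
      + (if cs.any (fun c => !((97 ≤ c.toNat && c.toNat ≤ 122) || (65 ≤ c.toNat && c.toNat ≤ 90)
            || (48 ≤ c.toNat && c.toNat ≤ 57))) then 1 else 0)
    if kinds < 3 then false
    else pvBLoop cs PySem.Dict.empty 0

-- ===== PRECONDITION & SPEC =====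
def Spec_check_p (s : String) (out : Bool) : Prop := out = check_p_alt s
instance (s : String) (out : Bool) : Decidable (Spec_check_p s out) := by unfold Spec_check_p; infer_instance

-- ===== CLAIM (what is proved, stated in full; the proofs are below) =====
def Claim_equal_check_p : Prop := ∀ (s : String), Dom_check_p s → Spec_check_p s (check_p s)

-- ===== LEMMAS AND PROOFS =====

-- greedy non-overlapping occurrence count of the nonempty separator a :: sp, as Python's str.split counts

def pvNocc (a : Char) (sp : List Char) : List Char → Nat
  | [] => 0
  | c :: rest =>
    if (a :: sp).isPrefixOf (c :: rest) then 1 + pvNocc a sp (rest.drop sp.length)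
    else pvNocc a sp rest
termination_by l => l.length
decreasing_by all_goals simp

-- Chars.splitOn.go yields acc.length + 1 + (number of greedy occurrences) pieces
theorem pvGoLen (a : Char) (sp : List Char) :
    ∀ (fuel : Nat) (l cur : List Char) (acc : List (List Char)), l.length < fuel →
      (PySem.Chars.splitOn.go (a :: sp) fuel l cur acc).length = acc.length + 1 + pvNocc a sp l := by
  intro fuel
  induction fuel with
  | zero => intro l cur acc h; omega
  | succ f ih =>
    intro l cur acc h
    cases l with
    | nil => simp [PySem.Chars.splitOn.go, pvNocc]
    | cons c rest =>
      by_cases hp : (a :: sp).isPrefixOf (c :: rest)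
      · rw [PySem.Chars.splitOn.go]
        simp only [hp, if_pos]
        rw [ih, pvNocc]
        · simp [hp]; omega
        · simp at h ⊢; omega
      · rw [PySem.Chars.splitOn.go]
        simp only [hp, Bool.false_eq_true, if_false]
        rw [ih, pvNocc]
        · simp [hp]
        · simp at h ⊢; omega

theorem pvSplitLen (a : Char) (sp l : List Char) :
    (PySem.Chars.splitOn l (a :: sp)).length = 1 + pvNocc a sp l := by
  rw [PySem.Chars.splitOn, pvGoLen a sp (l.length + 1) l [] [] (by omega)]
  simp

theorem pvNoccOne (a : Char) (sp : List Char) (l : List Char) :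
    1 ≤ pvNocc a sp l ↔ ∃ q, (a :: sp) <+: l.drop q := by
  fun_induction pvNocc a sp l with
  | case1 => simp
  | case2 c rest hp ih =>
    constructor
    · intro _; exact ⟨0, by simpa using List.isPrefixOf_iff_prefix.mp hp⟩
    · intro _; omega
  | case3 c rest hp ih =>
    rw [ih]
    constructor
    · rintro ⟨q, hq⟩; exact ⟨q + 1, by simpa using hq⟩
    · rintro ⟨q, hq⟩
      cases q with
      | zero =>
        rw [List.drop_zero, ← List.isPrefixOf_iff_prefix] at hq
        simp [hq] at hp
      | succ q' => exact ⟨q', by simpa using hq⟩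

theorem pvNoccTwo (a : Char) (sp : List Char) (l : List Char) :
    2 ≤ pvNocc a sp l ↔
      ∃ p q, p + sp.length + 1 ≤ q ∧ (a :: sp) <+: l.drop p ∧ (a :: sp) <+: l.drop q := by
  fun_induction pvNocc a sp l with
  | case1 => simp
  | case2 c rest hp ih =>
    constructor
    · intro h2
      obtain ⟨q', hq'⟩ := (pvNoccOne a sp (rest.drop sp.length)).mp (by omega)
      refine ⟨0, sp.length + 1 + q', by omega, ?_, ?_⟩
      · simpa using List.isPrefixOf_iff_prefix.mp hp
      · rw [List.drop_drop] at hq'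
        simpa [Nat.add_comm, Nat.add_assoc, Nat.add_left_comm] using hq'
    · rintro ⟨p, q, hle, _, hq⟩
      have h1 : 1 ≤ pvNocc a sp (rest.drop sp.length) := by
        apply (pvNoccOne a sp (rest.drop sp.length)).mpr
        refine ⟨q - (sp.length + 1), ?_⟩
        rw [List.drop_drop]
        have : sp.length + (q - (sp.length + 1)) = q - 1 := by omega
        rw [this]
        have hq1 : (c :: rest).drop q = rest.drop (q - 1) := by
          cases q with
          | zero => omega
          | succ m => simp
        rw [hq1] at hq; exact hq
      omega
  | case3 c rest hp ih =>
    rw [ih]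
    constructor
    · rintro ⟨p, q, hle, hpp, hqp⟩
      exact ⟨p + 1, q + 1, by omega, by simpa using hpp, by simpa using hqp⟩
    · rintro ⟨p, q, hle, hpp, hqp⟩
      cases p with
      | zero =>
        rw [List.drop_zero, ← List.isPrefixOf_iff_prefix] at hpp
        simp [hpp] at hp
      | succ p' =>
        cases q with
        | zero => omega
        | succ q' => exact ⟨p', q', by omega, by simpa using hpp, by simpa using hqp⟩

-- the 3-character window of cs at position p
def pvGram (cs : List Char) (p : Nat) : List Char := (cs.drop p).take 3

theorem pvGramPrefix (cs : List Char) (p : Nat) (h : p + 3 ≤ cs.length) :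
    pvGram cs p <+: cs.drop p ∧ (pvGram cs p).length = 3 := by
  constructor
  · exact List.take_prefix 3 (cs.drop p)
  · simp [pvGram]; omega

theorem pvPrefixGram (cs sep : List Char) (p : Nat) (hl : sep.length = 3)
    (h : sep <+: cs.drop p) : pvGram cs p = sep ∧ p + 3 ≤ cs.length := by
  constructor
  · have := (List.prefix_iff_eq_take.mp h)
    rw [pvGram, ← hl, ← this]
  · have := h.length_le
    simp at this; omega

-- A's repeat loop fires iff some 3-gram occurs at two positions ≥ 3 apart
theorem pvALoop (cs : List Char) :
    ((PySem.List.pyRange 0 ((cs.length : Int) - 3) 1).any (fun i =>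
       3 ≤ (PySem.Chars.splitOn cs (PySem.List.slice cs (some i) (some (i + 3)))).length)) = true
    ↔ ∃ p q, p + 3 ≤ q ∧ q + 3 ≤ cs.length ∧ pvGram cs p = pvGram cs q := by
  rw [List.any_eq_true]
  constructor
  · rintro ⟨i, hmem, hcond⟩
    rw [PySem.List.mem_pyRange_one] at hmem
    obtain ⟨h0, hlt⟩ := hmem
    -- i = ↑k
    obtain ⟨k, rfl⟩ : ∃ k : Nat, i = (k : Int) := ⟨i.toNat, by omega⟩
    have hk : k + 3 ≤ cs.length := by omega
    have hsl : PySem.List.slice cs (some (k : Int)) (some ((k : Int) + 3)) = pvGram cs k := by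
      have := PySem.List.slice_natCast_add (xs := cs) (j := k) (n := 3)
      simpa [pvGram] using this
    rw [hsl] at hcond
    have hlen : (pvGram cs k).length = 3 := (pvGramPrefix cs k hk).2
    obtain ⟨a, sp, hcons⟩ : ∃ a sp, pvGram cs k = a :: sp := by
      cases hg : pvGram cs k with
      | nil => rw [hg] at hlen; simp at hlen
      | cons a sp => exact ⟨a, sp, rfl⟩
    rw [hcons, pvSplitLen] at hcond
    have hsp : sp.length = 2 := by
      rw [hcons] at hlen; simpa using hlen
    have h2 : 2 ≤ pvNocc a sp cs := by
      simp at hcond; omega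
    obtain ⟨p, q, hle, hpp, hqp⟩ := (pvNoccTwo a sp cs).mp h2
    rw [← hcons] at hpp hqp
    obtain ⟨hgp, hple⟩ := pvPrefixGram cs _ p hlen hpp
    obtain ⟨hgq, hqle⟩ := pvPrefixGram cs _ q hlen hqp
    exact ⟨p, q, by omega, hqle, by rw [hgp, hgq]⟩
  · rintro ⟨p, q, hpq, hq, hg⟩
    refine ⟨(p : Int), ?_, ?_⟩
    · rw [PySem.List.mem_pyRange_one]; constructor
      · omega
      · omega
    · have hp3 : p + 3 ≤ cs.length := by omega
      have hsl : PySem.List.slice cs (some (p : Int)) (some ((p : Int) + 3)) = pvGram cs p := by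
        have := PySem.List.slice_natCast_add (xs := cs) (j := p) (n := 3)
        simpa [pvGram] using this
      rw [hsl]
      have hlen : (pvGram cs p).length = 3 := (pvGramPrefix cs p hp3).2
      obtain ⟨a, sp, hcons⟩ : ∃ a sp, pvGram cs p = a :: sp := by
        cases hgg : pvGram cs p with
        | nil => rw [hgg] at hlen; simp at hlen
        | cons a sp => exact ⟨a, sp, rfl⟩
      rw [hcons, pvSplitLen]
      have hsp : sp.length = 2 := by rw [hcons] at hlen; simpa using hlen
      have h2 : 2 ≤ pvNocc a sp cs := by
        apply (pvNoccTwo a sp cs).mpr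
        refine ⟨p, q, by omega, ?_, ?_⟩
        · rw [← hcons]; exact (pvGramPrefix cs p hp3).1
        · rw [← hcons, hg]; exact (pvGramPrefix cs q hq).1
      simp
      omega

-- invariant of B's dict: it maps each seen 3-gram to its first position among indices < i
def pvInv (cs : List Char) (d : PySem.Dict (List Char) Nat) (i : Nat) : Prop :=
  ∀ g j, d.get? g = some j ↔ (j < i ∧ pvGram cs j = g ∧ ∀ p, p < j → pvGram cs p ≠ g)

theorem pvInvNone (cs : List Char) (d : PySem.Dict (List Char) Nat) (i : Nat)
    (hinv : pvInv cs d i) (g : List Char) (hg : d.get? g = none) :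
    ∀ p, p < i → pvGram cs p ≠ g := by
  intro p hp heq
  have hex : ∃ p, p < i ∧ pvGram cs p = g := ⟨p, hp, heq⟩
  classical
  have : d.get? g = some (Nat.find hex) := by
    apply (hinv g (Nat.find hex)).mpr
    have hlt := (Nat.find_spec hex).1
    refine ⟨hlt, (Nat.find_spec hex).2, ?_⟩
    intro r hr hre
    exact (Nat.find_min hex hr) ⟨by omega, hre⟩
  rw [hg] at this; simp at this

theorem pvBLoopSpec (cs : List Char) :
    ∀ (m i : Nat) (d : PySem.Dict (List Char) Nat), cs.length - 2 - i = m → pvInv cs d i →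
      (pvBLoop cs d i = true ↔
        ¬∃ p q, i ≤ q ∧ q < cs.length - 2 ∧ p + 3 ≤ q ∧ pvGram cs p = pvGram cs q) := by
  intro m
  induction m with
  | zero =>
    intro i d hm _
    have hi : ¬ i < cs.length - 2 := by omega
    rw [pvBLoop, if_neg hi]
    simp only [true_iff]
    rintro ⟨p, q, h1, h2, _, _⟩; omega
  | succ m ih =>
    intro i d hm hinv
    have hi : i < cs.length - 2 := by omega
    rw [pvBLoop, if_pos hi]
    have hgr : (cs.drop i).take 3 = pvGram cs i := rfl
    cases hg : d.get? ((cs.drop i).take 3) with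
    | some j =>
      rw [hgr] at hg
      obtain ⟨hji, hjg, hjmin⟩ := (hinv _ _).mp hg
      by_cases h3 : 3 ≤ i - j
      · simp only [hgr, hg, h3, if_pos]
        constructor
        · intro h; exact absurd h (by simp)
        · intro hno
          exact absurd ⟨j, i, le_refl i, hi, by omega, hjg⟩ hno
      · simp only [hgr, hg, h3, if_false]
        have hinv' : pvInv cs d (i + 1) := by
          intro g' j'
          rw [hinv g' j']
          constructor
          · rintro ⟨h1, h2, h3'⟩; exact ⟨by omega, h2, h3'⟩
          · rintro ⟨h1, h2, h3'⟩
            refine ⟨?_, h2, h3'⟩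
            rcases Nat.lt_succ_iff_lt_or_eq.mp h1 with h | rfl
            · exact h
            · exact absurd hjg (by rw [h2]; exact h3' j hji)
        rw [ih (i + 1) d (by omega) hinv']
        constructor
        · intro hno
          rintro ⟨p, q, hq1, hq2, hq3, hq4⟩
          rcases Nat.lt_or_ge i q with h | h
          · exact hno ⟨p, q, by omega, hq2, hq3, hq4⟩
          · -- q = i
            have hqi : q = i := by omega
            subst hqi
            have : ¬ p < j := fun hpj => (hjmin p hpj) hq4
            omega
        · intro hno
          rintro ⟨p, q, hq1, hq2, hq3, hq4⟩
          exact hno ⟨p, q, by omega, hq2, hq3, hq4⟩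
    | none =>
      rw [hgr] at hg
      have hnone := pvInvNone cs d i hinv _ hg
      have hinv' : pvInv cs (d.insert (pvGram cs i) i) (i + 1) := by
        intro g' j'
        rw [PySem.Dict.get?_insert]
        split_ifs with he
        · subst he
          constructor
          · rintro ⟨rfl⟩
            exact ⟨by omega, rfl, hnone⟩
          · rintro ⟨h1, h2, h3'⟩
            rcases Nat.lt_succ_iff_lt_or_eq.mp h1 with h | rfl
            · exact absurd h2 (hnone j' h)
            · rfl
        · rw [hinv g' j']
          constructor
          · rintro ⟨h1, h2, h3'⟩; exact ⟨by omega, h2, h3'⟩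
          · rintro ⟨h1, h2, h3'⟩
            refine ⟨?_, h2, h3'⟩
            rcases Nat.lt_succ_iff_lt_or_eq.mp h1 with h | rfl
            · exact h
            · exact absurd h2 (fun hh => he hh.symm)
      simp only [hgr, hg]
      rw [ih (i + 1) _ (by omega) hinv']
      constructor
      · intro hno
        rintro ⟨p, q, hq1, hq2, hq3, hq4⟩
        rcases Nat.lt_or_ge i q with h | h
        · exact hno ⟨p, q, by omega, hq2, hq3, hq4⟩
        · have hqi : q = i := by omega
          subst hqi
          exact (hnone p (by omega)) hq4
      · intro hno
        rintro ⟨p, q, hq1, hq2, hq3, hq4⟩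
        exact hno ⟨p, q, by omega, hq2, hq3, hq4⟩

theorem pvFoldFlags (cs : List Char) : ∀ st : Int × Int × Int × Int,
    cs.foldl pvAStep st =
      ((if cs.any (fun c => 97 ≤ c.toNat && c.toNat ≤ 122) then 1 else st.1),
       (if cs.any (fun c => 65 ≤ c.toNat && c.toNat ≤ 90) then 1 else st.2.1),
       (if cs.any (fun c => 48 ≤ c.toNat && c.toNat ≤ 57) then 1 else st.2.2.1),
       (if cs.any (fun c => !((97 ≤ c.toNat && c.toNat ≤ 122) || (65 ≤ c.toNat && c.toNat ≤ 90)
            || (48 ≤ c.toNat && c.toNat ≤ 57))) then 1 else st.2.2.2)) := by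
  induction cs with
  | nil => intro st; simp
  | cons c rest ih =>
    intro st
    rw [List.foldl_cons, ih]
    obtain ⟨a, b, cc, d⟩ := st
    by_cases h1 : (97 ≤ c.toNat && c.toNat ≤ 122) = true
    · have p1 : 97 ≤ c.toNat ∧ c.toNat ≤ 122 := by simpa using h1
      simp [pvAStep, h1]
      repeat' apply And.intro
      all_goals refine if_congr ?_ rfl rfl
      all_goals first
        | exact Iff.rfl
        | (refine Iff.symm (or_iff_right ?_); omega)
    · have p1 : ¬(97 ≤ c.toNat ∧ c.toNat ≤ 122) := by simpa using h1
      by_cases h2 : (65 ≤ c.toNat && c.toNat ≤ 90) = true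
      · have p2 : 65 ≤ c.toNat ∧ c.toNat ≤ 90 := by simpa using h2
        simp [pvAStep, h1, h2]
        repeat' apply And.intro
        all_goals refine if_congr ?_ rfl rfl
        all_goals first
          | exact Iff.rfl
          | (refine Iff.symm (or_iff_right ?_); omega)
      · have p2 : ¬(65 ≤ c.toNat ∧ c.toNat ≤ 90) := by simpa using h2
        by_cases h3 : (48 ≤ c.toNat && c.toNat ≤ 57) = true
        · have p3 : 48 ≤ c.toNat ∧ c.toNat ≤ 57 := by simpa using h3
          simp [pvAStep, h1, h2, h3]
          all_goals refine if_congr ?_ rfl rfl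
          all_goals first
            | exact Iff.rfl
            | (refine Iff.symm (or_iff_right ?_); omega)
        · have p3 : ¬(48 ≤ c.toNat ∧ c.toNat ≤ 57) := by simpa using h3
          simp [pvAStep, h1, h2, h3]
          intro hA _
          exact absurd (hA (by omega) (by omega)) p3

theorem pvInvEmpty (cs : List Char) : pvInv cs PySem.Dict.empty 0 := by
  intro g j
  rw [PySem.Dict.get?_empty]
  simp

theorem check_p_eq (s : String) : check_p s = check_p_alt s := by
  unfold check_p check_p_alt
  by_cases h8 : ((s.toList.length : Int) ≤ 8)
  · simp only [if_pos h8]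
  · have hn : 9 ≤ s.toList.length := by omega
    simp only [h8, if_false, pvFoldFlags]
    set cs := s.toList with hcs
    by_cases hS : ((if cs.any (fun c => 97 ≤ c.toNat && c.toNat ≤ 122) then (1:Int) else 0)
      + (if cs.any (fun c => 65 ≤ c.toNat && c.toNat ≤ 90) then 1 else 0)
      + (if cs.any (fun c => 48 ≤ c.toNat && c.toNat ≤ 57) then 1 else 0)
      + (if cs.any (fun c => !((97 ≤ c.toNat && c.toNat ≤ 122) || (65 ≤ c.toNat && c.toNat ≤ 90)
            || (48 ≤ c.toNat && c.toNat ≤ 57))) then 1 else 0)) < 3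
    · simp only [hS, if_pos]
    · simp only [hS, if_false]
      by_cases hrep : ∃ p q, p + 3 ≤ q ∧ q + 3 ≤ cs.length ∧ pvGram cs p = pvGram cs q
      · rw [if_pos ((pvALoop cs).mpr hrep)]
        symm
        rw [← Bool.not_eq_true, pvBLoopSpec cs (cs.length - 2) 0 _ rfl (pvInvEmpty cs)]
        obtain ⟨p, q, hpq, hq, hg⟩ := hrep
        exact not_not_intro ⟨p, q, Nat.zero_le q, by omega, hpq, hg⟩
      · rw [if_neg (fun h => hrep ((pvALoop cs).mp h))]
        symm
        rw [pvBLoopSpec cs (cs.length - 2) 0 _ rfl (pvInvEmpty cs)]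
        rintro ⟨p, q, _, hq2, hq3, hq4⟩
        exact hrep ⟨p, q, hq3, by omega, hq4⟩

-- ===== VERDICT (by name: the statement is the Claim_ definition above) =====
theorem check_p_spec : Claim_equal_check_p := by
  intro s _
  unfold Spec_check_p
  exact check_p_eq s
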